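-- pv_equiv track=rewrite | github.com/ainagarciaes/CDI-lab | Lab2/02.1_Huffman_PRACTICA.py | DecodeHuffman
-- ===== SOURCE A (Python) =====
-- def DecodeHuffman(mensaje_codificado,m2c):
--     c2m = {v: k for k, v in m2c.items()}
--
--     mensaje_decodificado = ''
--     code = ''
--     for c in mensaje_codificado:
--         code += c
--         if (code in c2m):
--             mensaje_decodificado += c2m.get(code)
--             code = ''
--     return mensaje_decodificado
-- ===== SOURCE B (Python) =====
-- def DecodeHuffman(mensaje_codificado, m2c):
--     # Build a prefix tree over the codes: node = [decoded_symbol_or_None, {bitchar: child}]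
--     root = [None, {}]
--     for k, v in m2c.items():
--         node = root
--         for ch in v:
--             node = node[1].setdefault(ch, [None, {}])
--         node[0] = k
--     out = []
--     cur = root
--     for c in mensaje_codificado:
--         cur = cur[1].get(c)
--         if cur is None:
--             break  # no code has the accumulated bits as a prefix: nothing can ever match again
--         if cur[0] is not None:
--             out.append(cur[0])
--             cur = root
--     return ''.join(out)
-- ===== Notes on version B (the rewrite author's own statement) =====
-- stated objective: idiomatic
-- what changed: Replaces the grow-a-string-and-probe-the-dict loop by building a prefix tree from the codes once and walking it one child per bit, emitting at terminal nodes and breaking out when no code has the consumed bits as a prefix.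
import Mathlib
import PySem

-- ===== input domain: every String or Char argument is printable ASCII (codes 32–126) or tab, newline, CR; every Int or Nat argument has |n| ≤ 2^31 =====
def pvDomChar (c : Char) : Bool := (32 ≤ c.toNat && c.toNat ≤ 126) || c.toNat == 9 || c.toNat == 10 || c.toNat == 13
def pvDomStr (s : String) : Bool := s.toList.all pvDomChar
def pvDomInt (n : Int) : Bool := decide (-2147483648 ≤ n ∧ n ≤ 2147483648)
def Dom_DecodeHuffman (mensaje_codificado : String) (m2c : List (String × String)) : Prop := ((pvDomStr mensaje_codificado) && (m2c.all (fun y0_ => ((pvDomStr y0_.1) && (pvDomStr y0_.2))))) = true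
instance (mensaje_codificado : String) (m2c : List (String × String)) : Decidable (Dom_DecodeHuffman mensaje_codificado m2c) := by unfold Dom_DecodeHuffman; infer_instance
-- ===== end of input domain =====

-- B replaces A's grow-a-prefix-and-probe-the-dict loop by a prefix tree built once from
-- the codes and walked one bit at a time (objective: idiomatic); same return value.

-- ===== PORT A =====
-- Python A receives m2c as a dict; the assoc-list argument is first normalised to Python
-- dict semantics (later pairs overwrite, first-occurrence order) exactly as dict(pairs) does.
def DecodeHuffman (mensaje_codificado : String) (m2c : List (String × String)) : String :=
  let md : PySem.Dict String String :=
    m2c.foldl (fun d kv => d.insert kv.1 kv.2) PySem.Dict.empty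
  -- c2m = {v: k for k, v in m2c.items()}
  let c2m : PySem.Dict String String :=
    md.items.foldl (fun d kv => d.insert kv.2 kv.1) PySem.Dict.empty
  -- for c in mensaje_codificado: code += c; if code in c2m: decoded += c2m.get(code); code = ''
  let r := mensaje_codificado.toList.foldl
    (fun (st : String × List Char) c =>
      let code := st.2 ++ [c]
      match c2m.get? (String.ofList code) with
      | some m => (st.1 ++ m, [])
      | none => (st.1, code)) ("", [])
  r.1

-- ===== PORT B =====
-- prefix tree: node = (terminal symbol?, children); explicit child-list type (mutual pair)
mutual
inductive HTrie where
  | node : Option String → HChildren → HTrie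
inductive HChildren where
  | nil : HChildren
  | cons : Char → HTrie → HChildren → HChildren
end

def HTrie.sym : HTrie → Option String
  | .node s _ => s

def HTrie.children : HTrie → HChildren
  | .node _ ch => ch

-- node[1].get(c)
def HChildren.get : HChildren → Char → Option HTrie
  | .nil, _ => none
  | .cons d t rest, c => if c = d then some t else rest.get c

-- overwrite/append the child at c
def HChildren.set : HChildren → Char → HTrie → HChildren
  | .nil, c, t => .cons c t .nil
  | .cons d u rest, c, t => if c = d then .cons d t rest else .cons d u (rest.set c t)

-- the inner 'for ch in v: node = node[1].setdefault(ch, [None, {}])' plus 'node[0] = k'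
def HTrie.insertPath : HTrie → List Char → String → HTrie
  | .node _ ch, [], k => .node (some k) ch
  | .node s ch, c :: p, k =>
      .node s (ch.set c (((ch.get c).getD (.node none .nil)).insertPath p k))

-- m2c is a Python dict in Source B too: same dict(pairs) normalisation as in port A.
-- The 'break' of Source B is rendered as the dead state 'none', in which the fold does
-- nothing for the remaining characters (identical result).
def DecodeHuffman_alt (mensaje_codificado : String) (m2c : List (String × String)) : String :=
  let md : PySem.Dict String String :=
    m2c.foldl (fun d kv => d.insert kv.1 kv.2) PySem.Dict.empty
  let root : HTrie :=
    md.items.foldl (fun t kv => t.insertPath kv.2.toList kv.1) (.node none .nil)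
  let r := mensaje_codificado.toList.foldl
    (fun (st : String × Option HTrie) c =>
      match st.2 with
      | none => st
      | some t =>
        match t.children.get c with
        | none => (st.1, none)
        | some t' =>
          match t'.sym with
          | some k => (st.1 ++ k, some root)
          | none => (st.1, some t')) ("", some root)
  r.1

-- ===== PRECONDITION & SPEC =====
def Spec_DecodeHuffman (mensaje_codificado : String) (m2c : List (String × String)) (out : String) : Prop := out = DecodeHuffman_alt mensaje_codificado m2c
instance (mensaje_codificado : String) (m2c : List (String × String)) (out : String) : Decidable (Spec_DecodeHuffman mensaje_codificado m2c out) := by unfold Spec_DecodeHuffman; infer_instance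

-- ===== CLAIM (what is proved, stated in full; the proofs are below) =====
def Claim_equal_DecodeHuffman : Prop := ∀ (mensaje_codificado : String) (m2c : List (String × String)), Dom_DecodeHuffman mensaje_codificado m2c → Spec_DecodeHuffman mensaje_codificado m2c (DecodeHuffman mensaje_codificado m2c)

-- ===== LEMMAS AND PROOFS =====

-- walking a path through the trie (proof-only helper)
def hWalk : HTrie → List Char → Option HTrie
  | t, [] => some t
  | t, c :: s =>
    match t.children.get c with
    | none => none
    | some t' => hWalk t' s

theorem hWalk_append (s : List Char) (c : Char) (t : HTrie) :
    hWalk t (s ++ [c]) = (hWalk t s).bind (fun u => u.children.get c) := by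
  induction s generalizing t with
  | nil =>
    simp only [List.nil_append]
    cases h : t.children.get c <;> simp [hWalk, h]
  | cons d s ih =>
    simp only [List.cons_append, hWalk]
    cases t.children.get d with
    | none => rfl
    | some t' => exact ih t'

theorem hWalk_empty_sym (s : List Char) :
    (hWalk (HTrie.node none .nil) s).bind HTrie.sym = none := by
  cases s with
  | nil => rfl
  | cons c s => simp [hWalk, HTrie.children, HChildren.get]

theorem get_set : ∀ (ch : HChildren) (c d : Char) (t : HTrie),
    (ch.set c t).get d = if d = c then some t else ch.get d
  | .nil, c, d, t => by
    by_cases h : d = c <;> simp [HChildren.set, HChildren.get, h]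
  | .cons e u rest, c, d, t => by
    simp only [HChildren.set]
    by_cases h1 : c = e
    · subst h1
      by_cases h2 : d = c <;> simp [HChildren.get, h2]
    · by_cases h2 : d = e
      · subst h2
        have h2' : ¬ d = c := fun h => h1 h.symm
        simp [h1, HChildren.get, h2']
      · simp [h1, HChildren.get, h2, get_set rest c d t]

theorem walk_insertPath_sym (p : List Char) (t : HTrie) (k : String) (s : List Char) :
    (hWalk (t.insertPath p k) s).bind HTrie.sym
      = if s = p then some k else (hWalk t s).bind HTrie.sym := by
  induction p generalizing t s with
  | nil =>
    cases t with
    | node sy ch =>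
      cases s with
      | nil => simp [HTrie.insertPath, hWalk, HTrie.sym]
      | cons c s => simp [HTrie.insertPath, hWalk, HTrie.children]
  | cons c p ih =>
    cases t with
    | node sy ch =>
      cases s with
      | nil => simp [HTrie.insertPath, hWalk, HTrie.sym]
      | cons d s =>
        simp only [HTrie.insertPath, hWalk, HTrie.children, get_set]
        by_cases hdc : d = c
        · subst hdc
          rw [if_pos rfl, ih]
          cases hget : ch.get d with
          | none =>
            simp only [Option.getD_none]
            by_cases hsp : s = p
            · simp [hsp]
            · simp [hsp, hWalk_empty_sym]
          | some u =>
            simp only [Option.getD_some]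
            by_cases hsp : s = p
            · simp [hsp]
            · simp [hsp]
        · rw [if_neg hdc, if_neg (by simp [hdc])]

-- building the reversed dict and building the trie from the same pair list agree
theorem build_agree (l : List (String × String)) (d : PySem.Dict String String) (t : HTrie)
    (h : ∀ s : List Char, d.get? (String.ofList s) = (hWalk t s).bind HTrie.sym) :
    ∀ s : List Char,
      (l.foldl (fun d kv => d.insert kv.2 kv.1) d).get? (String.ofList s)
        = (hWalk (l.foldl (fun t kv => t.insertPath kv.2.toList kv.1) t) s).bind HTrie.sym := by
  induction l generalizing d t with
  | nil => exact h
  | cons kv l ih =>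
    simp only [List.foldl_cons]
    apply ih
    intro s
    rw [PySem.Dict.get?_insert, walk_insertPath_sym, h]
    by_cases hs : s = kv.2.toList
    · subst hs; simp [String.ofList_toList]
    · rw [if_neg hs, if_neg]
      intro hmk
      exact hs (by rw [← hmk, String.toList_ofList])

-- the two decoding loops agree, given the lookup agreement and the walk invariant
theorem loop_agree (root : HTrie) (c2m : PySem.Dict String String)
    (h : ∀ s : List Char, c2m.get? (String.ofList s) = (hWalk root s).bind HTrie.sym)
    (cs : List Char) :
    ∀ (out : String) (code : List Char) (cur : Option HTrie), cur = hWalk root code →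
      (cs.foldl (fun (st : String × List Char) c =>
          let code := st.2 ++ [c]
          match c2m.get? (String.ofList code) with
          | some m => (st.1 ++ m, [])
          | none => (st.1, code)) (out, code)).1
      = (cs.foldl (fun (st : String × Option HTrie) c =>
          match st.2 with
          | none => st
          | some t =>
            match t.children.get c with
            | none => (st.1, none)
            | some t' =>
              match t'.sym with
              | some k => (st.1 ++ k, some root)
              | none => (st.1, some t')) (out, cur)).1 := by
  induction cs with
  | nil => intro out code cur hcur; rfl
  | cons c cs ih =>
    intro out code cur hcur
    simp only [List.foldl_cons]
    cases cur with
    | none =>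
      have hwalk : hWalk root (code ++ [c]) = none := by
        rw [hWalk_append, ← hcur]; rfl
      have hget : c2m.get? (String.ofList (code ++ [c])) = none := by
        rw [h, hwalk]; rfl
      simp only [hget]
      exact ih out (code ++ [c]) none hwalk.symm
    | some t =>
      have hwalk : hWalk root (code ++ [c]) = t.children.get c := by
        rw [hWalk_append, ← hcur]; rfl
      cases hc : t.children.get c with
      | none =>
        have hwalk' : hWalk root (code ++ [c]) = none := hwalk.trans hc
        have hget : c2m.get? (String.ofList (code ++ [c])) = none := by
          rw [h, hwalk']; rfl
        simp only [hget, hc]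
        exact ih out (code ++ [c]) none hwalk'.symm
      | some t' =>
        have hwalk' : hWalk root (code ++ [c]) = some t' := hwalk.trans hc
        have hget : c2m.get? (String.ofList (code ++ [c])) = t'.sym := by
          rw [h, hwalk']; rfl
        cases hsym : t'.sym with
        | none =>
          simp only [hget, hsym, hc]
          exact ih out (code ++ [c]) (some t') hwalk'.symm
        | some k =>
          simp only [hget, hsym, hc]
          exact ih (out ++ k) [] (some root) rfl

-- ===== VERDICT (by name: the statement is the Claim_ definition above) =====
theorem DecodeHuffman_spec : Claim_equal_DecodeHuffman := by
  intro mensaje m2c _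
  unfold Spec_DecodeHuffman DecodeHuffman DecodeHuffman_alt
  exact loop_agree _ _
    (build_agree _ PySem.Dict.empty (.node none .nil)
      (fun s => by rw [PySem.Dict.get?_empty, hWalk_empty_sym]))
    mensaje.toList "" [] _ rfl
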